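-- pv_equiv track=rewrite | github.com/Mr-Baga08/genome_project | backend/app/services/data_flow.py | _get_similarity_group
-- ===== SOURCE A (Python) =====
-- from typing import List, Dict, Any, Optional, Union
--
-- def _get_similarity_group(sequence: Dict, parameters: Dict) -> str:
--     """Get similarity group for sequence using k-mer analysis"""
--     k = parameters.get('k_mer_size', 3)
--     sequence_data = sequence.get('sequence', '')
--
--     if len(sequence_data) < k:
--         return "too_short"
--
--     # Simple k-mer based grouping
--     kmers = []
--     for i in range(len(sequence_data) - k + 1):
--         kmers.append(sequence_data[i:i+k])
--
--     # Use first k-mer as group identifier (simplified)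
--     return kmers[0] if kmers else "ungrouped"
-- ===== SOURCE B (Python) =====
-- def _get_similarity_group(sequence, parameters):
--     k = parameters.get('k_mer_size', 3)
--     sequence_data = sequence.get('sequence', '')
--     if len(sequence_data) < k:
--         return "too_short"
--     # The first k-mer is exactly the leading slice; no k-mer list is needed.
--     return sequence_data[:k]
-- ===== Notes on version B (the rewrite author's own statement) =====
-- stated objective: simpler
-- what changed: B deletes the loop that builds the whole k-mer list and returns the leading slice sequence_data[:k] directly, which equals the only k-mer A ever uses (kmers[0]); the unreachable 'ungrouped' branch disappears.
import Mathlib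
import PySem

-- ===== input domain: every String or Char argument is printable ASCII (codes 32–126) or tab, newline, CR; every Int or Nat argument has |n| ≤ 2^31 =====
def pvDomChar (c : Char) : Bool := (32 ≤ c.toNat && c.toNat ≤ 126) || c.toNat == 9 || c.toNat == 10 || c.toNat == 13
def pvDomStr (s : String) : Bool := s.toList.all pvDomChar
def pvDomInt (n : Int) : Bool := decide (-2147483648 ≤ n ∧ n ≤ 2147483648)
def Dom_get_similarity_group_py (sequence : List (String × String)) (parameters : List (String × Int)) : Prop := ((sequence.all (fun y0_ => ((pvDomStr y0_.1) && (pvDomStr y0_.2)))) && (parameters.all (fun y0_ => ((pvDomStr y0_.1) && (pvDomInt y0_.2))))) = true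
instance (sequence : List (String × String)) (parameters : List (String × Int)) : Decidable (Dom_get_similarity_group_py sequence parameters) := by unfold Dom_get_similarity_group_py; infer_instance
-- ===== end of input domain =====

-- B drops A's k-mer list construction and returns the leading slice directly (simpler, same value everywhere).

-- ===== PORT A =====
def get_similarity_group_py (sequence : List (String × String)) (parameters : List (String × Int)) : String :=
  let k := PySem.Dict.getD ⟨parameters⟩ "k_mer_size" 3
  let sequence_data := PySem.Dict.getD ⟨sequence⟩ "sequence" ""
  if PySem.Str.len sequence_data < k then "too_short"
  else
    let kmers : List String :=
      (PySem.List.pyRange 0 (PySem.Str.len sequence_data - k + 1) 1).foldl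
        (fun acc i => acc ++ [PySem.Str.slice sequence_data (some i) (some (i + k))]) []
    if kmers ≠ [] then PySem.List.pyGetD kmers 0 "" else "ungrouped"

-- ===== PORT B =====
def get_similarity_group_py_alt (sequence : List (String × String)) (parameters : List (String × Int)) : String :=
  let k := PySem.Dict.getD ⟨parameters⟩ "k_mer_size" 3
  let sequence_data := PySem.Dict.getD ⟨sequence⟩ "sequence" ""
  if PySem.Str.len sequence_data < k then "too_short"
  else PySem.Str.slice sequence_data none (some k)

-- ===== PRECONDITION & SPEC =====
def Spec_get_similarity_group_py (sequence : List (String × String)) (parameters : List (String × Int)) (out : String) : Prop := out = get_similarity_group_py_alt sequence parameters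
instance (sequence : List (String × String)) (parameters : List (String × Int)) (out : String) : Decidable (Spec_get_similarity_group_py sequence parameters out) := by unfold Spec_get_similarity_group_py; infer_instance

-- ===== CLAIM (what is proved, stated in full; the proofs are below) =====
def Claim_equal_get_similarity_group_py : Prop := ∀ (sequence : List (String × String)) (parameters : List (String × Int)), Dom_get_similarity_group_py sequence parameters → Spec_get_similarity_group_py sequence parameters (get_similarity_group_py sequence parameters)

-- ===== LEMMAS AND PROOFS =====

theorem equal_aux (sequence : List (String × String)) (parameters : List (String × Int)) :
    get_similarity_group_py sequence parameters = get_similarity_group_py_alt sequence parameters := by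
  unfold get_similarity_group_py get_similarity_group_py_alt
  set k := PySem.Dict.getD (⟨parameters⟩ : PySem.Dict String Int) "k_mer_size" 3 with hk
  set s := PySem.Dict.getD (⟨sequence⟩ : PySem.Dict String String) "sequence" "" with hs
  by_cases h : PySem.Str.len s < k
  · simp only [h, if_true]
  · have h' : k ≤ (s.toList.length : Int) := by rw [PySem.Str.len_eq] at h; omega
    have hlt : (0 : Int) < PySem.Str.len s - k + 1 := by rw [PySem.Str.len_eq]; omega
    simp only [h, if_false]
    rw [PySem.List.foldl_append_singleton_eq_map, PySem.List.pyRange_one_cons hlt]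
    simp [PySem.List.pyGetD_zero_cons, PySem.Str.slice]

-- ===== VERDICT (by name: the statement is the Claim_ definition above) =====
theorem get_similarity_group_py_spec : Claim_equal_get_similarity_group_py := by
  intro sequence parameters _
  unfold Spec_get_similarity_group_py
  exact equal_aux sequence parameters
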